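-- pv_equiv track=rewrite | github.com/202425123/gaming-integrity-analytics | count.py | get_match_times
-- ===== SOURCE A (Python) =====
-- def get_match_times(kills_data):
--     """Takes list of kills data
--     Calculates the start and end times of each match based on the first and last kill
--     Returns dictionary of match start and end times
--     """
--     match_times = {}
--     for match_id, killer_id, victim_id, time in kills_data:
--         if match_id not in match_times:
--             match_times[match_id] = {"start": time, "end": time}
--         else:
--             # Start time is the first kill in match
--             if time < match_times[match_id]["start"]:
--                 match_times[match_id]["start"] = time
--             # End time is the last kill in match
--             if time > match_times[match_id]["end"]:
--                 match_times[match_id]["end"] = time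
--     return match_times
-- ===== SOURCE B (Python) =====
-- def get_match_times(kills_data):
--     """Group kill times per match, then reduce each group with min/max."""
--     pairs = [(match_id, time) for match_id, _killer, _victim, time in kills_data]
--     groups = {}
--     for match_id, time in pairs:
--         groups.setdefault(match_id, []).append(time)
--     return {mid: {"start": min(times), "end": max(times)}
--             for mid, times in groups.items()}
-- ===== Notes on version B (the rewrite author's own statement) =====
-- stated objective: alternative
-- what changed: Replaces the inline branchy running min/max tracking inside one loop with a group-then-reduce shape: first pass groups kill times per match_id in an insertion-ordered dict of lists, second pass maps each group to {start: min, end: max}.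
import Mathlib
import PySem

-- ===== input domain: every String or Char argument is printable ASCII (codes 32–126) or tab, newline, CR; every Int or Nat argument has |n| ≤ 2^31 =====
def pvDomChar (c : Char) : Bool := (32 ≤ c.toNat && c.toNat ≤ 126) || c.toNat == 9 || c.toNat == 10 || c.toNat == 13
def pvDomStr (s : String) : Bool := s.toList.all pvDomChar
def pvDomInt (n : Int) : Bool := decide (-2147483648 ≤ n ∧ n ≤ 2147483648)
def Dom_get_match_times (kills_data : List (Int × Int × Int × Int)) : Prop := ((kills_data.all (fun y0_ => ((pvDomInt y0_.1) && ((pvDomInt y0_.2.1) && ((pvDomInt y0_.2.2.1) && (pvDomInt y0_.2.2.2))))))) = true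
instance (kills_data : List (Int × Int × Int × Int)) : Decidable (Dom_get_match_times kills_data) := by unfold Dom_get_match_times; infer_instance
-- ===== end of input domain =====

-- B groups the kill times per match and reduces each group with min/max, instead of A's
-- inline running min/max tracking; same cost, different decomposition.

-- ===== PORT A =====
-- A: one loop; the first kill of a match inserts {"start": t, "end": t}, a later kill
-- mutates the inner dict in place (modify) when its time is a new min/max.
def get_match_times (kills_data : List (Int × Int × Int × Int)) : List (Int × List (String × Int)) :=
  let match_times : PySem.Dict Int (PySem.Dict String Int) :=
    kills_data.foldl (fun mt q =>
      if mt.contains q.1 = false then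
        mt.insert q.1 (PySem.Dict.ofList [("start", q.2.2.2), ("end", q.2.2.2)])
      else
        mt.modify q.1 PySem.Dict.empty (fun inner =>
          let inner := if q.2.2.2 < inner.getD "start" 0 then inner.insert "start" q.2.2.2 else inner
          if q.2.2.2 > inner.getD "end" 0 then inner.insert "end" q.2.2.2 else inner))
      PySem.Dict.empty
  match_times.items.map (fun p => (p.1, p.2.items))

-- ===== PORT B =====
-- B: extract (match_id, time) pairs, group the times per match_id, then map each group
-- to [("start", min), ("end", max)].
def get_match_times_alt (kills_data : List (Int × Int × Int × Int)) : List (Int × List (String × Int)) :=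
  let pairs : List (Int × Int) := kills_data.map (fun q => (q.1, q.2.2.2))
  let groups : PySem.Dict Int (List Int) :=
    pairs.foldl (fun d p => d.modify p.1 [] (fun ts => ts ++ [p.2])) PySem.Dict.empty
  groups.items.map (fun p =>
    (p.1, [("start", (PySem.List.min? p.2 (fun y => y)).getD 0),
           ("end",   (PySem.List.max? p.2 (fun y => y)).getD 0)]))

-- ===== PRECONDITION & SPEC =====
def Spec_get_match_times (kills_data : List (Int × Int × Int × Int)) (out : List (Int × List (String × Int))) : Prop := out = get_match_times_alt kills_data
instance (kills_data : List (Int × Int × Int × Int)) (out : List (Int × List (String × Int))) : Decidable (Spec_get_match_times kills_data out) := by unfold Spec_get_match_times; infer_instance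

-- ===== CLAIM (what is proved, stated in full; the proofs are below) =====
def Claim_equal_get_match_times : Prop := ∀ (kills_data : List (Int × Int × Int × Int)), Dom_get_match_times kills_data → Spec_get_match_times kills_data (get_match_times kills_data)

-- ===== LEMMAS AND PROOFS =====

def pvTimes (l : List (Int × Int × Int × Int)) (m : Int) : List Int :=
  (l.filter (fun q => q.1 == m)).map (fun q => q.2.2.2)
lemma pvTimes_append (l : List (Int × Int × Int × Int)) (q : Int × Int × Int × Int) (m : Int) :
    pvTimes (l ++ [q]) m = pvTimes l m ++ (if q.1 = m then [q.2.2.2] else []) := by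
  simp only [pvTimes, List.filter_append, List.map_append]
  congr 1
  split_ifs with h <;> simp [h]
lemma pvTimes_nil_of_not_mem (l : List (Int × Int × Int × Int)) (m : Int)
    (h : m ∉ l.map (·.1)) : pvTimes l m = [] := by
  simp only [pvTimes, List.map_eq_nil_iff, List.filter_eq_nil_iff]
  intro q hq hqm
  exact h (List.mem_map.mpr ⟨q, hq, by simpa using hqm⟩)
lemma pvTimes_ne_nil_of_mem (l : List (Int × Int × Int × Int)) (m : Int)
    (h : m ∈ l.map (·.1)) : pvTimes l m ≠ [] := by
  obtain ⟨q, hq, rfl⟩ := List.mem_map.mp h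
  simp only [pvTimes, ne_eq, List.map_eq_nil_iff, List.filter_eq_nil_iff]
  push Not
  exact ⟨q, hq, by simp⟩
def pvSE (s e : Int) : PySem.Dict String Int := PySem.Dict.ofList [("start", s), ("end", e)]
lemma pvSE_getD_start (s e : Int) : (pvSE s e).getD "start" 0 = s := rfl
lemma pvSE_getD_end (s e : Int) : (pvSE s e).getD "end" 0 = e := rfl
lemma pvSE_insert_start (s e t : Int) : (pvSE s e).insert "start" t = pvSE t e := rfl
lemma pvSE_insert_end (s e t : Int) : (pvSE s e).insert "end" t = pvSE s t := rfl

def pvFA (l : List (Int × Int × Int × Int)) : PySem.Dict Int (PySem.Dict String Int) :=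
  l.foldl (fun mt q =>
      if mt.contains q.1 = false then
        mt.insert q.1 (PySem.Dict.ofList [("start", q.2.2.2), ("end", q.2.2.2)])
      else
        mt.modify q.1 PySem.Dict.empty (fun inner =>
          let inner := if q.2.2.2 < inner.getD "start" 0 then inner.insert "start" q.2.2.2 else inner
          if q.2.2.2 > inner.getD "end" 0 then inner.insert "end" q.2.2.2 else inner))
    PySem.Dict.empty


lemma pvMin_ite (s t : Int) : min s t = if t < s then t else s := by
  rw [min_def]; split_ifs <;> omega

lemma pvMax_ite (e t : Int) : max e t = if t > e then t else e := by
  rw [max_def]; split_ifs <;> omega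

lemma pvUpd (s e t : Int) :
    (let inner := pvSE s e
     let inner := if t < inner.getD "start" 0 then inner.insert "start" t else inner
     if t > inner.getD "end" 0 then inner.insert "end" t else inner)
      = pvSE (min s t) (max e t) := by
  rw [pvMin_ite, pvMax_ite]
  by_cases h1 : t < s <;>
    simp only [pvSE_getD_start, h1, if_true, if_false, pvSE_insert_start, pvSE_getD_end] <;>
    by_cases h2 : t > e <;>
    simp [h2, pvSE_insert_end]

lemma pvFA_spec (l : List (Int × Int × Int × Int)) :
    (pvFA l).keys = PySem.Set.ofList (l.map (·.1)) ∧
    ∀ m : Int, (pvFA l).getD m PySem.Dict.empty =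
      (match pvTimes l m with
       | [] => PySem.Dict.empty
       | t :: ts => pvSE (ts.foldl min t) (ts.foldl max t)) := by
  induction l using List.reverseRecOn with
  | nil => exact ⟨rfl, fun m => rfl⟩
  | append_singleton l q ih =>
    obtain ⟨hkeys, hget⟩ := ih
    have hFA : pvFA (l ++ [q]) = (fun mt (q : Int × Int × Int × Int) =>
      if mt.contains q.1 = false then
        mt.insert q.1 (PySem.Dict.ofList [("start", q.2.2.2), ("end", q.2.2.2)])
      else
        mt.modify q.1 PySem.Dict.empty (fun inner =>
          let inner := if q.2.2.2 < inner.getD "start" 0 then inner.insert "start" q.2.2.2 else inner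
          if q.2.2.2 > inner.getD "end" 0 then inner.insert "end" q.2.2.2 else inner)) (pvFA l) q := by
      simp [pvFA, List.foldl_append]
    by_cases hm : q.1 ∈ l.map (·.1)
    · -- q.1 already present: in-place update of the inner dict
      have hc : (pvFA l).contains q.1 = true := by
        rw [PySem.Dict.contains_iff_mem_keys, hkeys]
        exact (PySem.Set.mem_ofList _ _).mpr hm
      have hstep : pvFA (l ++ [q]) = (pvFA l).insert q.1
          (let inner := (pvFA l).getD q.1 PySem.Dict.empty
           let inner := if q.2.2.2 < inner.getD "start" 0 then inner.insert "start" q.2.2.2 else inner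
           if q.2.2.2 > inner.getD "end" 0 then inner.insert "end" q.2.2.2 else inner) := by
        rw [hFA]; simp only [hc, Bool.true_eq_false, if_false]; rfl
      refine ⟨?_, ?_⟩
      · rw [hstep, PySem.Dict.keys_insert_of_contains _ _ hc, hkeys]
        simp [PySem.Set.ofList_append_singleton,
          PySem.Set.add_of_mem ((PySem.Set.mem_ofList _ _).mpr hm)]
      · intro m
        rw [hstep, PySem.Dict.getD_insert, pvTimes_append]
        by_cases hmq : m = q.1
        · subst hmq
          obtain ⟨t0, ts, hts⟩ := List.exists_cons_of_ne_nil (pvTimes_ne_nil_of_mem l q.1 hm)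
          rw [if_pos rfl, if_pos rfl, hget q.1, hts, pvUpd, List.cons_append]
          have h1 : (ts ++ [q.2.2.2]).foldl min t0 = min (ts.foldl min t0) q.2.2.2 := by
            simp [List.foldl_append]
          have h2 : (ts ++ [q.2.2.2]).foldl max t0 = max (ts.foldl max t0) q.2.2.2 := by
            simp [List.foldl_append]
          simp [h1, h2]
        · rw [if_neg hmq, if_neg (fun h => hmq h.symm), List.append_nil, hget m]
    · -- fresh match_id: insert {"start": t, "end": t}
      have hc : (pvFA l).contains q.1 = false := by
        rw [← Bool.not_eq_true, PySem.Dict.contains_iff_mem_keys, hkeys]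
        simpa [PySem.Set.mem_ofList] using hm
      have hstep : pvFA (l ++ [q]) = (pvFA l).insert q.1
          (PySem.Dict.ofList [("start", q.2.2.2), ("end", q.2.2.2)]) := by
        rw [hFA]; simp [hc]
      refine ⟨?_, ?_⟩
      · rw [hstep, PySem.Dict.keys_insert_of_not_contains _ _ hc, hkeys]
        simp [PySem.Set.ofList_append_singleton,
          PySem.Set.add_of_not_mem (fun h => hm ((PySem.Set.mem_ofList _ _).mp h))]
      · intro m
        rw [hstep, PySem.Dict.getD_insert, pvTimes_append]
        by_cases hmq : m = q.1
        · subst hmq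
          rw [if_pos rfl, if_pos rfl, pvTimes_nil_of_not_mem l q.1 hm]
          rfl
        · rw [if_neg hmq, if_neg (fun h => hmq h.symm), List.append_nil, hget m]

def pvFB (l : List (Int × Int × Int × Int)) : PySem.Dict Int (List Int) :=
  (l.map (fun q => (q.1, q.2.2.2))).foldl
    (fun d p => d.modify p.1 [] (fun ts => ts ++ [p.2])) PySem.Dict.empty

lemma pvFB_keys (l : List (Int × Int × Int × Int)) :
    (pvFB l).keys = PySem.Set.ofList (l.map (·.1)) := by
  refine (PySem.Dict.keys_foldl_modify_key (l.map (fun q => (q.1, q.2.2.2)))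
    (fun p => p.1) [] (fun _ p ts => ts ++ [p.2]) PySem.Dict.empty).trans ?_
  show PySem.Set.update [] _ = _
  rw [PySem.Set.update_nil_left, List.map_map]
  rfl

lemma pvFB_getD (l : List (Int × Int × Int × Int)) (m : Int) :
    (pvFB l).getD m [] = pvTimes l m := by
  refine (PySem.Dict.getD_foldl_modify_append (l.map (fun q => (q.1, q.2.2.2)))
    PySem.Dict.empty m).trans ?_
  show [] ++ _ = _
  rw [List.nil_append, pvTimes, List.filter_map, List.map_map]
  rfl

lemma pvMain (kd : List (Int × Int × Int × Int)) : get_match_times kd = get_match_times_alt kd := by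
  obtain ⟨hkeys, hget⟩ := pvFA_spec kd
  have hA : get_match_times kd = (pvFA kd).items.map (fun p => (p.1, p.2.items)) := rfl
  have hB : get_match_times_alt kd = (pvFB kd).items.map (fun p =>
    (p.1, [("start", (PySem.List.min? p.2 (fun y => y)).getD 0),
           ("end",   (PySem.List.max? p.2 (fun y => y)).getD 0)])) := rfl
  rw [hA, hB,
    PySem.Dict.items_eq_map_keys (pvFA kd) (by rw [hkeys]; exact PySem.Set.nodup_ofList _) PySem.Dict.empty,
    PySem.Dict.items_eq_map_keys (pvFB kd) (by rw [pvFB_keys]; exact PySem.Set.nodup_ofList _) ([]),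
    hkeys, pvFB_keys, List.map_map, List.map_map]
  apply List.map_congr_left
  intro m hmem
  have hm : m ∈ kd.map (·.1) := (PySem.Set.mem_ofList _ _).mp hmem
  obtain ⟨t0, ts, hts⟩ := List.exists_cons_of_ne_nil (pvTimes_ne_nil_of_mem kd m hm)
  simp only [Function.comp]
  rw [hget m, hts, pvFB_getD, hts, PySem.List.min?_id_cons, PySem.List.max?_id_cons]
  rfl

-- ===== VERDICT (by name: the statement is the Claim_ definition above) =====
theorem get_match_times_spec : Claim_equal_get_match_times :=
  fun kd _ => pvMain kd
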